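-- pv_equiv track=rewrite | github.com/gotham29/htm-monitor | src/htm_monitor/cli/analyze_run.py | _episodes_from_boolean
-- ===== SOURCE A (Python) =====
-- from typing import Any, Dict, List, Optional, Sequence, Set, Tuple
--
-- def _episodes_from_boolean(mask: Sequence[bool], t_index: Sequence[int]) -> List[Tuple[int, int]]:
--     """
--     Contiguous [start_t, end_t] episodes (inclusive).
--     Assumes t_index is increasing; adjacency is defined by t == prev_t + 1.
--     """
--     eps: List[Tuple[int, int]] = []
--     start: Optional[int] = None
--     prev_t: Optional[int] = None
--
--     for on, t in zip(mask, t_index):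
--         if on and start is None:
--             start = int(t)
--             prev_t = int(t)
--             continue
--
--         if on and start is not None:
--             if prev_t is not None and int(t) == int(prev_t) + 1:
--                 prev_t = int(t)
--                 continue
--             # gap -> close previous, start new
--             eps.append((int(start), int(prev_t if prev_t is not None else start)))
--             start = int(t)
--             prev_t = int(t)
--             continue
--
--         if (not on) and start is not None:
--             eps.append((int(start), int(prev_t if prev_t is not None else start)))
--             start = None
--             prev_t = None
--
--     if start is not None:
--         eps.append((int(start), int(prev_t if prev_t is not None else start)))
--     return eps
-- ===== SOURCE B (Python) =====
-- from itertools import groupby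
-- from typing import List, Sequence, Tuple
--
-- def _episodes_from_boolean(mask: Sequence[bool], t_index: Sequence[int]) -> List[Tuple[int, int]]:
--     """Two-stage version: groupby splits maximal on/off runs of the mask;
--     each on-run is then split further wherever t is not prev+1."""
--     eps: List[Tuple[int, int]] = []
--     for on, grp in groupby(zip(mask, t_index), key=lambda p: bool(p[0])):
--         if not on:
--             continue
--         ts = [int(t) for _, t in grp]
--         start = prev = ts[0]
--         for t in ts[1:]:
--             if t != prev + 1:
--                 eps.append((start, prev))
--                 start = t
--             prev = t
--         eps.append((start, prev))
--     return eps
-- ===== Notes on version B (the rewrite author's own statement) =====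
-- stated objective: idiomatic
-- what changed: Replaces the interleaved three-branch state machine (start/prev Optionals threaded through one loop) by two shaped stages: itertools.groupby splits the zipped (mask, t) stream into maximal on/off runs, and each on-run's t-values are then split at non-adjacent steps.
import Mathlib
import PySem

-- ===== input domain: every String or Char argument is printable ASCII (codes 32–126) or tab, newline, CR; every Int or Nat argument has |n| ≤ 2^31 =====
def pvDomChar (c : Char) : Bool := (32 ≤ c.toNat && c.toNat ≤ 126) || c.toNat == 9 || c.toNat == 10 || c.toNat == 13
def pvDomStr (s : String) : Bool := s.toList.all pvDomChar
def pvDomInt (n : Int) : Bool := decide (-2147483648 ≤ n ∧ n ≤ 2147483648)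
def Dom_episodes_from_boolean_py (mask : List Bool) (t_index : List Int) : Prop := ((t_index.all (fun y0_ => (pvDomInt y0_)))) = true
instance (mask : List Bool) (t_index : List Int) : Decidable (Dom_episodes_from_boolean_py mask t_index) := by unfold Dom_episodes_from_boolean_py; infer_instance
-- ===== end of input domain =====

-- B re-structures A's single Optional-state machine as two stages (groupby into maximal
-- on/off runs, then adjacency-splitting inside each on-run); same return value, no speed claim.

-- ===== PORT A =====
-- one step of A's state machine: state = (eps, start, prev); branches in Python's order
def aStep (st : List (Int × Int) × Option Int × Option Int) (p : Bool × Int) :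
    List (Int × Int) × Option Int × Option Int :=
  let (eps, start, prev) := st
  let (on, t) := p
  if on && start.isNone then (eps, some t, some t)
  else if on && start.isSome then
    (if prev.isSome && (t == prev.getD 0 + 1) then (eps, start, some t)
     else (eps ++ [(start.getD 0, prev.getD (start.getD 0))], some t, some t))
  else if !on && start.isSome then
    (eps ++ [(start.getD 0, prev.getD (start.getD 0))], none, none)
  else (eps, start, prev)

def episodes_from_boolean_py (mask : List Bool) (t_index : List Int) : List (Int × Int) :=
  let (eps, start, prev) := (mask.zip t_index).foldl aStep ([], none, none)
  match start with
  | some s => eps ++ [(s, prev.getD s)]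
  | none => eps

-- ===== PORT B =====
-- itertools.groupby over the zipped pairs, keyed on the mask flag: maximal runs
def groupRuns : List (Bool × Int) → List (Bool × List Int)
  | [] => []
  | (b, t) :: rest =>
    (b, t :: (rest.takeWhile (fun p => p.1 == b)).map (·.2)) ::
      groupRuns (rest.dropWhile (fun p => p.1 == b))
termination_by l => l.length
decreasing_by
  simp only [List.length_cons]
  exact Nat.lt_succ_of_le (List.length_dropWhile_le _ _)

-- inner loop of B over the t-values of one on-run
def emitLoop (eps : List (Int × Int)) (start prev : Int) : List Int → List (Int × Int)
  | [] => eps ++ [(start, prev)]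
  | t :: ts =>
    if t ≠ prev + 1 then emitLoop (eps ++ [(start, prev)]) t t ts
    else emitLoop eps start t ts

def episodes_from_boolean_py_alt (mask : List Bool) (t_index : List Int) : List (Int × Int) :=
  (groupRuns (mask.zip t_index)).foldl
    (fun eps g =>
      if g.1 then
        match g.2 with
        | [] => eps  -- unreachable: groupby's runs are nonempty
        | t :: ts => emitLoop eps t t ts
      else eps) []

-- ===== PRECONDITION & SPEC =====
def Spec_episodes_from_boolean_py (mask : List Bool) (t_index : List Int) (out : List (Int × Int)) : Prop := out = episodes_from_boolean_py_alt mask t_index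
instance (mask : List Bool) (t_index : List Int) (out : List (Int × Int)) : Decidable (Spec_episodes_from_boolean_py mask t_index out) := by unfold Spec_episodes_from_boolean_py; infer_instance

-- ===== CLAIM (what is proved, stated in full; the proofs are below) =====
def Claim_equal_episodes_from_boolean_py : Prop := ∀ (mask : List Bool) (t_index : List Int), Dom_episodes_from_boolean_py mask t_index → Spec_episodes_from_boolean_py mask t_index (episodes_from_boolean_py mask t_index)

-- ===== LEMMAS AND PROOFS =====

-- ===== VERDICT (by name: the statement is the Claim_ definition above) =====
-- pure (non-accumulator) forms used only by the proofs
def aLoop : List (Bool × Int) → Option (Int × Int) → List (Int × Int)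
  | [], none => []
  | [], some (s, p) => [(s, p)]
  | (on, t) :: rest, none => if on then aLoop rest (some (t, t)) else aLoop rest none
  | (on, t) :: rest, some (s, p) =>
    if on then
      (if t = p + 1 then aLoop rest (some (s, t)) else (s, p) :: aLoop rest (some (t, t)))
    else (s, p) :: aLoop rest none

def emit (s p : Int) : List Int → List (Int × Int)
  | [] => [(s, p)]
  | t :: ts => if t ≠ p + 1 then (s, p) :: emit t t ts else emit s t ts

def runOut (g : Bool × List Int) : List (Int × Int) :=
  if g.1 then match g.2 with | [] => [] | t :: ts => emit t t ts else []

theorem emitLoop_eq (ts : List Int) : ∀ eps s p, emitLoop eps s p ts = eps ++ emit s p ts := by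
  induction ts with
  | nil => intro eps s p; simp [emitLoop, emit]
  | cons t ts ih =>
    intro eps s p
    simp only [emitLoop, emit]
    split <;> simp [ih]

theorem bFold_eq (gs : List (Bool × List Int)) : ∀ eps,
    gs.foldl (fun eps g => if g.1 then (match g.2 with | [] => eps | t :: ts => emitLoop eps t t ts) else eps) eps
      = eps ++ gs.flatMap runOut := by
  induction gs with
  | nil => intro eps; simp
  | cons g gs ih =>
    intro eps
    rcases g with ⟨b, ts0⟩
    simp only [List.foldl_cons, List.flatMap_cons, runOut]
    cases b with
    | false => simp [ih]
    | true =>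
      cases ts0 with
      | nil => simp [ih]
      | cons t ts =>
        simp only [if_true]
        rw [emitLoop_eq, ih]
        simp

-- A's trailing "if start is not None" close, factored for the proofs
def finishA : List (Int × Int) × Option Int × Option Int → List (Int × Int)
  | (e, some s, p) => e ++ [(s, p.getD s)]
  | (e, none, _) => e

theorem aFold (l : List (Bool × Int)) : ∀ eps,
    (finishA (l.foldl aStep (eps, none, none)) = eps ++ aLoop l none) ∧
    (∀ s p, finishA (l.foldl aStep (eps, some s, some p)) = eps ++ aLoop l (some (s, p))) := by
  induction l with
  | nil =>
    intro eps
    exact ⟨by simp [finishA, aLoop], fun s p => by simp [finishA, aLoop]⟩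
  | cons h rest ih =>
    rcases h with ⟨on, t⟩
    intro eps
    constructor
    · cases on with
      | true =>
        simp only [List.foldl_cons]
        rw [show aStep (eps, none, none) (true, t) = (eps, some t, some t) from rfl]
        rw [(ih eps).2 t t]
        simp [aLoop]
      | false =>
        simp only [List.foldl_cons]
        rw [show aStep (eps, none, none) (false, t) = (eps, none, none) from rfl]
        rw [(ih eps).1]
        simp [aLoop]
    · intro s p
      cases on with
      | true =>
        simp only [List.foldl_cons]
        rw [show aStep (eps, some s, some p) (true, t)
              = if (t == p + 1) = true then (eps, some s, some t)
                else (eps ++ [(s, p)], some t, some t) from rfl]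
        by_cases ht : t = p + 1
        · rw [if_pos (by simp [ht])]
          rw [(ih eps).2 s t]
          simp [aLoop, ht]
        · rw [if_neg (by simp [ht])]
          rw [(ih _).2 t t]
          simp [aLoop, if_neg ht]
      | false =>
        simp only [List.foldl_cons]
        rw [show aStep (eps, some s, some p) (false, t) = (eps ++ [(s, p)], none, none) from rfl]
        rw [(ih _).1]
        simp [aLoop]

theorem skipOff (l : List (Bool × Int)) :
    ((groupRuns l).flatMap runOut) = ((groupRuns (l.dropWhile (fun q => !q.1))).flatMap runOut) := by
  cases l with
  | nil => rfl
  | cons h r =>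
    rcases h with ⟨b, t⟩
    cases b with
    | true => simp [List.dropWhile]
    | false =>
      rw [groupRuns]
      simp [List.dropWhile, runOut, beq_false]

theorem main_aux (n : Nat) : ∀ (l : List (Bool × Int)), l.length ≤ n →
    (aLoop l none = (groupRuns l).flatMap runOut) ∧
    (∀ s p, aLoop l (some (s, p)) =
      emit s p ((l.takeWhile (fun q => q.1)).map (·.2)) ++
        ((groupRuns (l.dropWhile (fun q => q.1))).flatMap runOut)) := by
  induction n with
  | zero =>
    intro l hl
    have : l = [] := List.length_eq_zero_iff.mp (Nat.le_zero.mp hl)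
    subst this
    exact ⟨by simp [aLoop, groupRuns], fun s p => by simp [aLoop, emit, groupRuns]⟩
  | succ n ih =>
    intro l hl
    cases l with
    | nil => exact ⟨by simp [aLoop, groupRuns], fun s p => by simp [aLoop, emit, groupRuns]⟩
    | cons h rest =>
      rcases h with ⟨on, t⟩
      have hr : rest.length ≤ n := by simpa using Nat.le_of_succ_le_succ hl
      constructor
      · cases on with
        | true =>
          rw [show aLoop ((true, t) :: rest) none = aLoop rest (some (t, t)) by simp [aLoop]]
          rw [(ih rest hr).2 t t, groupRuns]
          simp [runOut, beq_true]
        | false =>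
          rw [show aLoop ((false, t) :: rest) none = aLoop rest none by simp [aLoop]]
          rw [(ih rest hr).1, skipOff rest, groupRuns]
          simp [runOut, beq_false]
      · intro s p
        cases on with
        | true =>
          by_cases ht : t = p + 1
          · rw [show aLoop ((true, t) :: rest) (some (s, p)) = aLoop rest (some (s, t)) by
              simp [aLoop, ht]]
            rw [(ih rest hr).2 s t]
            simp [emit, ht]
          · rw [show aLoop ((true, t) :: rest) (some (s, p))
                  = (s, p) :: aLoop rest (some (t, t)) by simp [aLoop, ht]]
            rw [(ih rest hr).2 t t]
            simp [emit, ht]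
        | false =>
          rw [show aLoop ((false, t) :: rest) (some (s, p)) = (s, p) :: aLoop rest none by
            simp [aLoop]]
          rw [(ih rest hr).1, skipOff rest]
          have hgr : List.dropWhile (fun q => q.1) ((false, t) :: rest) = (false, t) :: rest := by
            simp [List.dropWhile_cons]
          rw [hgr, groupRuns]
          simp [emit, runOut, beq_false]

theorem main_none (l : List (Bool × Int)) :
    aLoop l none = (groupRuns l).flatMap runOut :=
  (main_aux l.length l (Nat.le_refl _)).1

theorem episodes_from_boolean_py_spec : Claim_equal_episodes_from_boolean_py := by
  intro mask t_index _
  unfold Spec_episodes_from_boolean_py episodes_from_boolean_py episodes_from_boolean_py_alt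
  rw [bFold_eq, ← main_none]
  have := (aFold (mask.zip t_index) []).1
  simp only [List.nil_append] at this
  rw [← this]
  rcases h : (mask.zip t_index).foldl aStep ([], none, none) with ⟨e, st, p⟩
  cases st <;> simp [finishA]
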